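-- pv_equiv track=rewrite | github.com/givemeone1astkiss/RNA-Factory | app/utils/output.py | validate_dot_bracket
-- ===== SOURCE A (Python) =====
-- def validate_dot_bracket(sequence: str, dot_bracket: str) -> bool:
--     """
--     Validate dot-bracket notation against sequence
--
--     Args:
--         sequence: RNA sequence string
--         dot_bracket: Dot-bracket notation string
--
--     Returns:
--         True if valid, False otherwise
--     """
--     if len(sequence) != len(dot_bracket):
--         return False
--
--     # Check for valid characters
--     valid_chars = set('().')
--     if not all(c in valid_chars for c in dot_bracket):
--         return False
--
--     # Check for balanced parentheses
--     stack = []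
--     for char in dot_bracket:
--         if char == '(':
--             stack.append(char)
--         elif char == ')':
--             if not stack:
--                 return False
--             stack.pop()
--
--     return len(stack) == 0
-- ===== SOURCE B (Python) =====
-- def validate_dot_bracket(sequence: str, dot_bracket: str) -> bool:
--     if len(sequence) != len(dot_bracket):
--         return False
--     # String-rewriting judge: drop dots, then repeatedly cancel adjacent "()"
--     # pairs; the structure is valid iff the string reduces to empty (any
--     # invalid character or unmatched bracket survives every rewrite).
--     s = dot_bracket.replace('.', '')
--     while '()' in s:
--         s = s.replace('()', '')
--     return s == ''
-- ===== Notes on version B (the rewrite author's own statement) =====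
-- stated objective: alternative
-- what changed: Replaced A's explicit character-validity pass plus stack-based balance scan by a string-rewriting judge: delete all dots with replace('.',''), then repeatedly delete adjacent "()" pairs with replace('()','') until none remain; the notation is valid iff the string reduces to empty (invalid characters and unmatched brackets survive every rewrite).
import Mathlib
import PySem

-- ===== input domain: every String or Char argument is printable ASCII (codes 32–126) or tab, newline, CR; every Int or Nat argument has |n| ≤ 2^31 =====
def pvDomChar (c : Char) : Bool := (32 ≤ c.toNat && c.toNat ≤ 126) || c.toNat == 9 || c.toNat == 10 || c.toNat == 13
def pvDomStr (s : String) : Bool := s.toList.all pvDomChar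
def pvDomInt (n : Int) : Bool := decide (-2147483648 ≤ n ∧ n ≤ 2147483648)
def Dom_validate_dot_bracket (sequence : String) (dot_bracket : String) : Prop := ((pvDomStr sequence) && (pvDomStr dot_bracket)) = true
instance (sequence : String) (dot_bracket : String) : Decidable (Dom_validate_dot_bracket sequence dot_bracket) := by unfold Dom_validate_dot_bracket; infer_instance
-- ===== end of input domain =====

-- B replaces A's two scans (char-validity pass + explicit stack) by a string-rewriting judge:
-- delete dots, then repeatedly cancel adjacent "()" pairs; valid iff the string reduces to empty. Objective: alternative.


-- ===== PORT A =====
-- 'for char in dot_bracket' with append/pop on a LIFO stack, early return on ')' with empty stack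
def pvAStack : List Char → List Char → Bool
  | [], stack => stack.length == 0
  | c :: rest, stack =>
      if c = '(' then pvAStack rest (c :: stack)
      else if c = ')' then
        if stack.isEmpty then false else pvAStack rest stack.tail
      else pvAStack rest stack

def validate_dot_bracket (sequence : String) (dot_bracket : String) : Bool :=
  if sequence.toList.length ≠ dot_bracket.toList.length then false
  else if ¬ (dot_bracket.toList.all (fun c => decide (c ∈ ['(', ')', '.']))) then false
  else pvAStack dot_bracket.toList []

-- ===== PORT B =====
-- proof-side characterisation of s.replace('()','') (PySem.Chars.replace with pattern "()"),
-- needed by name in pvReduce's decreasing_by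
def replacePair : List Char → List Char
  | [] => []
  | [c] => [c]
  | c :: d :: t => if c = '(' ∧ d = ')' then replacePair t else c :: replacePair (d :: t)

theorem go_pair : ∀ (fuel : Nat) (l acc : List Char), l.length ≤ fuel →
    PySem.Chars.replace.go ['(', ')'] [] fuel l acc = acc.reverse ++ replacePair l := by
  intro fuel
  induction fuel with
  | zero =>
    intro l acc h
    have : l = [] := List.length_eq_zero_iff.mp (Nat.le_zero.mp h)
    subst this
    simp [PySem.Chars.replace.go, replacePair]
  | succ n ih =>
    intro l acc h
    match l with
    | [] => simp [PySem.Chars.replace.go, replacePair]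
    | [c] =>
      have hpre : List.isPrefixOf ['(', ')'] [c] = false := by
        simp [List.isPrefixOf]
      simp only [PySem.Chars.replace.go, hpre, Bool.false_eq_true, if_false]
      rw [ih [] (c :: acc) (by simp)]
      simp [replacePair]
    | c :: d :: t =>
      by_cases hp : c = '(' ∧ d = ')'
      · obtain ⟨rfl, rfl⟩ := hp
        have hpre : List.isPrefixOf ['(', ')'] ('(' :: ')' :: t) = true := by
          simp [List.isPrefixOf]
        simp only [PySem.Chars.replace.go, hpre, if_true]
        rw [show (['(', ')'] : List Char).length = 2 from rfl]
        simp only [List.drop_succ_cons, List.drop_zero, List.reverse_nil, List.nil_append]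
        rw [ih t acc (by simp at h; omega)]
        simp [replacePair]
      · have hpre : List.isPrefixOf ['(', ')'] (c :: d :: t) = false := by
          simp [List.isPrefixOf]
          intro h1 h2; exact hp ⟨h1.symm, h2.symm⟩
        simp only [PySem.Chars.replace.go, hpre, Bool.false_eq_true, if_false]
        rw [ih (d :: t) (c :: acc) (by simp at h ⊢; omega)]
        simp [replacePair, hp]

theorem replace_pair_eq (s : List Char) :
    PySem.Chars.replace s ['(', ')'] [] = replacePair s := by
  have h := go_pair s.length s [] (le_refl _)
  simpa [PySem.Chars.replace] using h

theorem replacePair_length_le : ∀ l : List Char, (replacePair l).length ≤ l.length := by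
  intro l
  induction l using replacePair.induct with
  | case1 => simp [replacePair]
  | case2 c => simp [replacePair]
  | case3 c d t hp ih =>
    simp only [replacePair, if_pos hp, List.length_cons]; omega
  | case4 c d t hp ih =>
    simp only [List.length_cons] at ih
    simp only [replacePair, if_neg hp, List.length_cons]; omega

theorem replacePair_lt_of_infix : ∀ l : List Char, ['(', ')'] <:+: l →
    (replacePair l).length < l.length := by
  intro l
  induction l using replacePair.induct with
  | case1 => intro h; have := h.length_le; simp at this
  | case2 c => intro h; have := h.length_le; simp at this
  | case3 c d t hp ih =>
    intro _
    have := replacePair_length_le t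
    simp only [replacePair, if_pos hp, List.length_cons]; omega
  | case4 c d t hp ih =>
    intro h
    obtain ⟨u, v, huv⟩ := h
    have hinf : ['(', ')'] <:+: (d :: t) := by
      cases u with
      | nil => simp at huv; exact absurd ⟨huv.1.symm, huv.2.1.symm⟩ hp
      | cons e u' =>
        refine ⟨u', v, ?_⟩
        have : e :: (u' ++ ['(', ')'] ++ v) = c :: d :: t := by simpa using huv
        exact (List.cons.injEq _ _ _ _ ▸ this).2
    have := ih hinf
    simp only [List.length_cons] at this
    simp only [replacePair, if_neg hp, List.length_cons]
    omega

-- while '()' in s: s = s.replace('()','')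
def pvReduce (s : List Char) : List Char :=
  if h : PySem.Chars.isIn ['(', ')'] s = true then
    pvReduce (PySem.Chars.replace s ['(', ')'] [])
  else s
termination_by s.length
decreasing_by
  rw [replace_pair_eq]
  exact replacePair_lt_of_infix s ((PySem.Chars.isIn_iff_infix _ _).mp h)

def validate_dot_bracket_alt (sequence : String) (dot_bracket : String) : Bool :=
  if sequence.toList.length ≠ dot_bracket.toList.length then false
  else pvReduce (PySem.Chars.replace dot_bracket.toList ['.'] []) == []

-- ===== PRECONDITION & SPEC =====
def Spec_validate_dot_bracket (sequence : String) (dot_bracket : String) (out : Bool) : Prop := out = validate_dot_bracket_alt sequence dot_bracket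
instance (sequence : String) (dot_bracket : String) (out : Bool) : Decidable (Spec_validate_dot_bracket sequence dot_bracket out) := by unfold Spec_validate_dot_bracket; infer_instance

-- ===== CLAIM (what is proved, stated in full; the proofs are below) =====
def Claim_equal_validate_dot_bracket : Prop := ∀ (sequence : String) (dot_bracket : String), Dom_validate_dot_bracket sequence dot_bracket → Spec_validate_dot_bracket sequence dot_bracket (validate_dot_bracket sequence dot_bracket)

-- ===== LEMMAS AND PROOFS =====

-- proof-side characterisation of s.replace('.','')
def removeDots : List Char → List Char
  | [] => []
  | c :: t => if c = '.' then removeDots t else c :: removeDots t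

theorem go_dot : ∀ (fuel : Nat) (l acc : List Char), l.length ≤ fuel →
    PySem.Chars.replace.go ['.'] [] fuel l acc = acc.reverse ++ removeDots l := by
  intro fuel
  induction fuel with
  | zero =>
    intro l acc h
    have : l = [] := List.length_eq_zero_iff.mp (Nat.le_zero.mp h)
    subst this
    simp [PySem.Chars.replace.go, removeDots]
  | succ n ih =>
    intro l acc h
    match l with
    | [] => simp [PySem.Chars.replace.go, removeDots]
    | c :: t =>
      by_cases hc : c = '.'
      · subst hc
        have hpre : List.isPrefixOf ['.'] ('.' :: t) = true := by simp [List.isPrefixOf]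
        simp only [PySem.Chars.replace.go, hpre, if_true]
        rw [show (['.'] : List Char).length = 1 from rfl]
        simp only [List.drop_succ_cons, List.drop_zero, List.reverse_nil, List.nil_append]
        rw [ih t acc (by simp at h; omega)]
        simp [removeDots]
      · have hpre : List.isPrefixOf ['.'] (c :: t) = false := by
          simp [List.isPrefixOf]
          exact fun h => hc h.symm
        simp only [PySem.Chars.replace.go, hpre, Bool.false_eq_true, if_false]
        rw [ih t (c :: acc) (by simp at h ⊢; omega)]
        simp [removeDots, hc]

theorem replace_dot_eq (s : List Char) :
    PySem.Chars.replace s ['.'] [] = removeDots s := by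
  have h := go_dot s.length s [] (le_refl _)
  simpa [PySem.Chars.replace] using h

theorem mem_removeDots : ∀ (l : List Char) (c : Char), c ∈ removeDots l → c ∈ l ∧ c ≠ '.' := by
  intro l c
  induction l with
  | nil => simp [removeDots]
  | cons d t ih =>
    simp only [removeDots]
    split_ifs with hd
    · intro h; exact ⟨List.mem_cons_of_mem _ (ih h).1, (ih h).2⟩
    · intro h
      rcases List.mem_cons.mp h with rfl | h
      · exact ⟨List.mem_cons_self, hd⟩
      · exact ⟨List.mem_cons_of_mem _ (ih h).1, (ih h).2⟩

theorem mem_removeDots_of_mem : ∀ (l : List Char) (c : Char), c ∈ l → c ≠ '.' → c ∈ removeDots l := by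
  intro l c
  induction l with
  | nil => simp
  | cons d t ih =>
    intro hm hc
    rcases List.mem_cons.mp hm with rfl | h
    · simp [removeDots, hc]
    · by_cases hd : d = '.'
      · simpa [removeDots, hd] using ih h hc
      · simp [removeDots, hd]; exact Or.inr (ih h hc)

theorem mem_of_mem_replacePair : ∀ (l : List Char) (c : Char), c ∈ replacePair l → c ∈ l := by
  intro l c
  induction l using replacePair.induct with
  | case1 => simp [replacePair]
  | case2 d => simp [replacePair]
  | case3 d e t hp ih =>
    simp only [replacePair, if_pos hp]
    intro h; exact List.mem_cons_of_mem _ (List.mem_cons_of_mem _ (ih h))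
  | case4 d e t hp ih =>
    simp only [replacePair, if_neg hp]
    intro h
    rcases List.mem_cons.mp h with rfl | h
    · exact List.mem_cons_self
    · exact List.mem_cons_of_mem _ (ih h)

theorem mem_replacePair : ∀ (l : List Char) (c : Char), c ∈ l → c ≠ '(' → c ≠ ')' → c ∈ replacePair l := by
  intro l c
  induction l using replacePair.induct with
  | case1 => simp
  | case2 d => intro hm _ _; simpa [replacePair] using hm
  | case3 d e t hp ih =>
    obtain ⟨rfl, rfl⟩ := hp
    intro hm h1 h2
    rcases List.mem_cons.mp hm with rfl | hm
    · exact absurd rfl h1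
    rcases List.mem_cons.mp hm with rfl | hm
    · exact absurd rfl h2
    simpa [replacePair] using ih hm h1 h2
  | case4 d e t hp ih =>
    intro hm h1 h2
    simp only [replacePair, if_neg hp]
    rcases List.mem_cons.mp hm with rfl | hm
    · exact List.mem_cons_self
    · exact List.mem_cons_of_mem _ (ih hm h1 h2)

theorem mem_pvReduce : ∀ (l : List Char) (c : Char), c ∈ l → c ≠ '(' → c ≠ ')' → c ∈ pvReduce l := by
  intro l
  induction l using pvReduce.induct with
  | case1 l h ih =>
    intro c hm h1 h2
    rw [pvReduce, dif_pos h]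
    exact ih c (by rw [replace_pair_eq]; exact mem_replacePair l c hm h1 h2) h1 h2
  | case2 l h =>
    intro c hm _ _
    rw [pvReduce, dif_neg h]
    exact hm

theorem pvAStack_removeDots : ∀ (l stack : List Char), pvAStack (removeDots l) stack = pvAStack l stack := by
  intro l
  induction l with
  | nil => intro stack; simp [removeDots]
  | cons c t ih =>
    intro stack
    by_cases hc : c = '.'
    · subst hc
      have h1 : ('.' : Char) ≠ '(' := by decide
      have h2 : ('.' : Char) ≠ ')' := by decide
      simp [removeDots, pvAStack, h1, h2, ih]
    · by_cases h1 : c = '('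
      · subst h1; simp [removeDots, pvAStack, ih]
      · by_cases h2 : c = ')'
        · subst h2
          simp only [removeDots, if_neg hc, pvAStack, if_neg h1]
          cases stack <;> simp [ih]
        · simp [removeDots, hc, pvAStack, h1, h2, ih]

theorem pvAStack_replacePair : ∀ (l : List Char), ∀ (stack : List Char),
    pvAStack (replacePair l) stack = pvAStack l stack := by
  intro l
  induction l using replacePair.induct with
  | case1 => intro stack; simp [replacePair]
  | case2 c => intro stack; simp [replacePair]
  | case3 c d t hp ih =>
    obtain ⟨rfl, rfl⟩ := hp
    intro stack
    have hrw : replacePair ('(' :: ')' :: t) = replacePair t := by simp [replacePair]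
    have hstep : pvAStack ('(' :: ')' :: t) stack = pvAStack t stack := by
      simp [pvAStack]
    rw [hrw, hstep]
    exact ih stack
  | case4 c d t hp ih =>
    intro stack
    simp only [replacePair, if_neg hp]
    by_cases h1 : c = '('
    · subst h1; simp only [pvAStack]; exact ih _
    · by_cases h2 : c = ')'
      · subst h2
        simp only [pvAStack, if_neg h1]
        cases stack with
        | nil => simp
        | cons s ss =>
          simp only [List.isEmpty_cons, Bool.false_eq_true, if_false, List.tail_cons]
          exact ih ss
      · simp only [pvAStack, if_neg h1, if_neg h2]
        exact ih _

theorem noPair_shape : ∀ (m : List Char), ¬ (['(', ')'] <:+: m) → (∀ c ∈ m, c = '(' ∨ c = ')') →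
    ∃ a b, m = List.replicate a ')' ++ List.replicate b '(' := by
  intro m
  induction m with
  | nil => intro _ _; exact ⟨0, 0, rfl⟩
  | cons c t ih =>
    intro hinf hv
    have hinf' : ¬ (['(', ')'] <:+: t) := fun h => hinf (h.trans (List.suffix_cons c t).isInfix)
    obtain ⟨a, b, rfl⟩ := ih hinf' (fun x hx => hv x (List.mem_cons_of_mem _ hx))
    rcases hv c List.mem_cons_self with rfl | rfl
    · -- c = '(' : then a must be 0, otherwise "()" is a prefix
      cases a with
      | zero => exact ⟨0, b + 1, by simp [List.replicate_succ]⟩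
      | succ a' =>
        exfalso
        apply hinf
        refine ⟨[], List.replicate a' ')' ++ List.replicate b '(', ?_⟩
        simp [List.replicate_succ]
    · exact ⟨a + 1, b, by simp [List.replicate_succ]⟩

theorem pvAStack_replicate_open : ∀ (b : Nat) (stack : List Char),
    pvAStack (List.replicate b '(') stack = (b + stack.length == 0) := by
  intro b
  induction b with
  | zero => intro stack; simp [pvAStack]
  | succ n ih =>
    intro stack
    have h1 : pvAStack (List.replicate (n + 1) '(') stack
        = pvAStack (List.replicate n '(') ('(' :: stack) := by
      simp [List.replicate_succ, pvAStack]
    rw [h1, ih ('(' :: stack)]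
    simp only [List.length_cons]
    have : n + (stack.length + 1) = n + 1 + stack.length := by omega
    rw [this]

theorem dyck : ∀ (m : List Char), (∀ c ∈ m, c = '(' ∨ c = ')') →
    pvAStack m [] = (pvReduce m == []) := by
  intro m
  induction m using pvReduce.induct with
  | case1 l h ih =>
    intro hv
    rw [pvReduce, dif_pos h]
    have hv' : ∀ c ∈ PySem.Chars.replace l ['(', ')'] [], c = '(' ∨ c = ')' := by
      intro c hc
      rw [replace_pair_eq] at hc
      exact hv c (mem_of_mem_replacePair l c hc)
    rw [← ih hv', replace_pair_eq, pvAStack_replacePair]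
  | case2 l h =>
    intro hv
    rw [pvReduce, dif_neg h]
    have hninf : ¬ (['(', ')'] <:+: l) := by
      rw [← PySem.Chars.isIn_iff_infix]
      simpa using h
    obtain ⟨a, b, rfl⟩ := noPair_shape l hninf hv
    cases a with
    | zero =>
      simp only [List.replicate_zero, List.nil_append]
      rw [pvAStack_replicate_open]
      cases b <;> simp
    | succ a' =>
      simp only [List.replicate_succ, List.cons_append]
      have h1 : (')' : Char) ≠ '(' := by decide
      simp [pvAStack, h1]

-- ===== VERDICT (by name: the statement is the Claim_ definition above) =====
theorem validate_dot_bracket_spec : Claim_equal_validate_dot_bracket := by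
  intro sequence dot_bracket _
  unfold Spec_validate_dot_bracket validate_dot_bracket validate_dot_bracket_alt
  by_cases hlen : sequence.toList.length ≠ dot_bracket.toList.length
  · rw [if_pos hlen, if_pos hlen]
  · rw [if_neg hlen, if_neg hlen, replace_dot_eq]
    by_cases hall : dot_bracket.toList.all (fun c => decide (c ∈ ['(', ')', '.'])) = true
    · rw [if_neg (fun hn => hn hall)]
      rw [← pvAStack_removeDots dot_bracket.toList []]
      apply dyck
      intro c hc
      obtain ⟨hm, hdot⟩ := mem_removeDots dot_bracket.toList c hc
      have := List.all_eq_true.mp hall c hm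
      simp at this
      rcases this with rfl | rfl | rfl
      · exact Or.inl rfl
      · exact Or.inr rfl
      · exact absurd rfl hdot
    · rw [if_pos hall]
      simp only [List.all_eq_true, not_forall] at hall
      obtain ⟨c, hm, hc⟩ := hall
      simp at hc
      obtain ⟨h1, h2, h3⟩ := hc
      have : c ∈ pvReduce (removeDots dot_bracket.toList) :=
        mem_pvReduce _ c (mem_removeDots_of_mem _ c hm h3) h1 h2
      symm
      simpa using List.ne_nil_of_mem this
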